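-- pv_equiv track=rewrite | github.com/saran00123/esp_bot | rover_server/rover_server/ref/task_6.py | dest_path
-- ===== SOURCE A (Python) =====
-- def deepcopy_2(old_list):
-- 	new_list = [ i for i in old_list ]
-- 	return new_list
--
-- def dest_path(paths, traffic_signal):
-- 	count = -1
-- 	TS_cnt = []
-- 	if len(paths) > 1:
-- 		for pth in paths:
-- 			count += 1
-- 			TS_cnt.append(0)
-- 			for i in range(len(pth)):
-- 				for j in range(len(traffic_signal)):
-- 					if pth[i] == traffic_signal[j]:
-- 						TS_cnt[count] += 1
-- 		cnt = deepcopy_2(TS_cnt)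
-- 		cnt.sort()
-- 		path_temp = paths[TS_cnt.index(cnt[0])]
--
-- 	if len(paths) == 1:
-- 		path_temp = deepcopy_2(paths[0])
--
-- 	return path_temp
-- ===== SOURCE B (Python) =====
-- def dest_path(paths, traffic_signal):
--     if len(paths) > 1:
--         best = None
--         best_c = None
--         for pth in paths:
--             c = sum(traffic_signal.count(x) for x in pth)
--             if best_c is None or c < best_c:
--                 best = pth
--                 best_c = c
--         path_temp = best
--     if len(paths) == 1:
--         path_temp = [i for i in paths[0]]
--     return path_temp
-- ===== Notes on version B (the rewrite author's own statement) =====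
-- stated objective: faster
-- what changed: Replaces the counts table built by index-nested loops plus sort-copy-index lookup with a single pass that tracks the current best path and its signal-hit count (strict '<' keeps the first minimum), counting hits via list.count; Pre_ excludes empty paths, where both raise UnboundLocalError.
import Mathlib
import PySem

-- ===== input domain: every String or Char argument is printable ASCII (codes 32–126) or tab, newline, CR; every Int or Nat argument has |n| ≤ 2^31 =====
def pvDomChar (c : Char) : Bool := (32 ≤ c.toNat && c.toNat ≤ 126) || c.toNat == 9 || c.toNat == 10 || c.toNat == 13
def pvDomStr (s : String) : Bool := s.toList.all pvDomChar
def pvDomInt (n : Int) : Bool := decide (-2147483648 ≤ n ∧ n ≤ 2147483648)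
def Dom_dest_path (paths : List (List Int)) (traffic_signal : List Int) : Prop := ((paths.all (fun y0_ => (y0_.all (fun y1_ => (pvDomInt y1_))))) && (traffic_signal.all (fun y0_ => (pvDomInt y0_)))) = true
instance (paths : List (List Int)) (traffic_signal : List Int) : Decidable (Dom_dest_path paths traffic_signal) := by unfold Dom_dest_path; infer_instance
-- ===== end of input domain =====

-- B replaces A's counts table + sort + index lookup by a single best-so-far pass; faster by a constant factor (no sort/copy/index passes).

-- ===== PORT A =====
-- literal port of A: counts table TS_cnt built with index-nested loops updating cell `count`,
-- then a sorted copy, then paths[TS_cnt.index(cnt[0])]; the empty-paths case (UnboundLocalError) is outside Pre_.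
def dest_path (paths : List (List Int)) (traffic_signal : List Int) : List Int :=
  let st := (if paths.length > 1 then
    paths.foldl (fun (st : Int × List Int) pth =>
      let count := st.1 + 1
      let TS0 := st.2 ++ [(0 : Int)]
      let TS := (List.range pth.length).foldl (fun T i =>
        (List.range traffic_signal.length).foldl (fun T j =>
          if pth.getD i 0 = traffic_signal.getD j 0 then
            T.set count.toNat (T.getD count.toNat 0 + 1)
          else T) T) TS0
      (count, TS)) ((-1 : Int), ([] : List Int))
  else ((-1 : Int), ([] : List Int)))
  if paths.length > 1 then
    let TS_cnt := st.2
    let cnt := PySem.List.sorted TS_cnt (fun x => x) false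
    paths.getD ((PySem.List.index? TS_cnt (cnt.getD 0 0)).getD 0) []
  else if paths.length = 1 then
    (paths.getD 0 []).map (fun i => i)   -- deepcopy_2
  else []  -- Python raises UnboundLocalError here; excluded by Pre_

-- ===== PORT B =====
-- literal port of B: one pass; state (best, best_c) as Options, strict `<` keeps the first minimum.
def dest_path_alt (paths : List (List Int)) (traffic_signal : List Int) : List Int :=
  if paths.length > 1 then
    let st := paths.foldl (fun (st : Option (List Int) × Option Int) pth =>
      let c : Int := pth.foldl (fun s x => s + (PySem.List.count traffic_signal x : Int)) 0
      match st.2 with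
      | none => (some pth, some c)
      | some bc => if c < bc then (some pth, some c) else st)
      ((none : Option (List Int)), (none : Option Int))
    st.1.getD []
  else if paths.length = 1 then
    (paths.getD 0 []).map (fun i => i)
  else []  -- Python raises UnboundLocalError here; excluded by Pre_

-- ===== PRECONDITION & SPEC =====
-- Pre_ excludes only empty `paths`, on which the Python A (and B) raise UnboundLocalError.
def Pre_dest_path (paths : List (List Int)) (traffic_signal : List Int) : Prop := paths ≠ []
instance (paths : List (List Int)) (traffic_signal : List Int) : Decidable (Pre_dest_path paths traffic_signal) := by unfold Pre_dest_path; infer_instance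
def pvWitness_dest_path : List (List Int) × List Int := ([[1, 2], [3]], [2, 3, 3])

def Spec_dest_path (paths : List (List Int)) (traffic_signal : List Int) (out : List Int) : Prop := out = dest_path_alt paths traffic_signal
instance (paths : List (List Int)) (traffic_signal : List Int) (out : List Int) : Decidable (Spec_dest_path paths traffic_signal out) := by unfold Spec_dest_path; infer_instance

-- ===== CLAIM (what is proved, stated in full; the proofs are below) =====
def Claim_equal_dest_path : Prop := ∀ (paths : List (List Int)) (traffic_signal : List Int), Dom_dest_path paths traffic_signal → Pre_dest_path paths traffic_signal → Spec_dest_path paths traffic_signal (dest_path paths traffic_signal)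

-- ===== LEMMAS AND PROOFS =====

-- the per-path cost B computes: total multiplicity of pth's elements in traffic_signal
def pvCost (ts : List Int) (p : List Int) : Int :=
  p.foldl (fun s x => s + (PySem.List.count ts x : Int)) 0

-- a fold over `range l.length` reading l.getD i IS a fold over l
theorem pv_range_fold {α β : Type} (l : List α) (d : α) (g : β → α → β) :
    ∀ (c : β), (List.range l.length).foldl (fun b i => g b (l.getD i d)) c = l.foldl g c := by
  induction l with
  | nil => intro c; simp
  | cons a t ih =>
      intro c
      simp only [List.length_cons, List.range_succ_eq_map, List.foldl_cons, List.foldl_map]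
      simpa using ih (g c a)

theorem pv_set_getD (T : List Int) (k : Nat) (v : Int) (hk : k < T.length) :
    (T.set k v).getD k 0 = v := by
  simp [List.getD, hk]

theorem pv_set_self (T : List Int) (k : Nat) : T.set k (T.getD k 0) = T := by
  by_cases hk : k < T.length
  · apply List.ext_getElem
    · simp
    · intro i h1 h2
      simp only [List.getElem_set]
      by_cases hik : k = i
      · subst hik; simp [List.getD, hk]
      · simp [hik]
  · simp [List.set_eq_of_length_le (le_of_not_gt hk)]

-- inner j-loop: conditional bump at cell k = add ts.count a at cell k
theorem pv_count_fold (ts : List Int) (a : Int) :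
    ∀ (T : List Int) (k : Nat),
      ts.foldl (fun T y => if a = y then T.set k (T.getD k 0 + 1) else T) T
      = T.set k (T.getD k 0 + (ts.count a : Int)) := by
  induction ts with
  | nil =>
      intro T k
      simp only [List.foldl_nil, List.count_nil, Nat.cast_zero, add_zero]
      exact (pv_set_self T k).symm
  | cons y t ih =>
      intro T k
      rw [List.foldl_cons]
      by_cases hy : a = y
      · rw [if_pos hy, ih]
        by_cases hk : k < T.length
        · rw [pv_set_getD T k _ hk, List.set_set]
          subst hy
          rw [List.count_cons_self]
          congr 1
          push_cast
          ring
        · have hk' : ¬ k < (T.set k (T.getD k 0 + 1)).length := by simpa using hk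
          rw [List.set_eq_of_length_le (le_of_not_gt hk),
              List.set_eq_of_length_le (le_of_not_gt hk),
              List.set_eq_of_length_le (le_of_not_gt hk)]
      · rw [if_neg hy, ih]
        have : (y :: t).count a = t.count a := by
          simp [Ne.symm hy]
        rw [this]

-- outer i-loop after inner elimination: successive bumps sum up to pvCost
theorem pv_bump_fold (ts : List Int) :
    ∀ (p : List Int) (T : List Int) (k : Nat),
      p.foldl (fun T x => T.set k (T.getD k 0 + (ts.count x : Int))) T
      = T.set k (T.getD k 0 + pvCost ts p) := by
  intro p
  induction p with
  | nil =>
      intro T k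
      simp only [List.foldl_nil, pvCost, add_zero]
      exact (pv_set_self T k).symm
  | cons x t ih =>
      intro T k
      rw [List.foldl_cons, ih]
      by_cases hk : k < T.length
      · rw [pv_set_getD T k _ hk, List.set_set]
        have hc : pvCost ts (x :: t) = (ts.count x : Int) + pvCost ts t := by
          simp only [pvCost, List.foldl_cons]
          have shift : ∀ (l : List Int) (s : Int),
              l.foldl (fun s x => s + (PySem.List.count ts x : Int)) s
              = s + l.foldl (fun s x => s + (PySem.List.count ts x : Int)) 0 := by
            intro l
            induction l with
            | nil => intro s; simp
            | cons z r ihr =>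
                intro s
                rw [List.foldl_cons, List.foldl_cons, ihr (s + _), ihr (0 + _)]
                ring
          rw [shift t ((0:Int) + _)]
          simp [PySem.List.count]
        rw [hc]
        congr 1
        ring
      · rw [List.set_eq_of_length_le (le_of_not_gt hk),
            List.set_eq_of_length_le (le_of_not_gt hk),
            List.set_eq_of_length_le (le_of_not_gt hk)]

-- A's state fold produces the map of costs
theorem pv_table_fold (ts : List Int) :
    ∀ (ps : List (List Int)) (L : List Int),
      (ps.foldl (fun (st : Int × List Int) pth =>
        let count := st.1 + 1
        let TS0 := st.2 ++ [(0 : Int)]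
        let TS := (List.range pth.length).foldl (fun T i =>
          (List.range ts.length).foldl (fun T j =>
            if pth.getD i 0 = ts.getD j 0 then
              T.set count.toNat (T.getD count.toNat 0 + 1)
            else T) T) TS0
        (count, TS)) ((L.length : Int) - 1, L)).2 = L ++ ps.map (pvCost ts) := by
  intro ps
  induction ps with
  | nil => intro L; simp
  | cons p rest ih =>
      intro L
      simp only [List.foldl_cons]
      have hk : ((L.length : Int) - 1 + 1).toNat = L.length := by omega
      have hinner : ∀ (T : List Int) (k : Nat),
          (List.range p.length).foldl (fun T i =>
            (List.range ts.length).foldl (fun T j =>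
              if p.getD i 0 = ts.getD j 0 then T.set k (T.getD k 0 + 1) else T) T) T
          = T.set k (T.getD k 0 + pvCost ts p) := by
        intro T k
        rw [pv_range_fold p (0:Int)
          (fun T x => (List.range ts.length).foldl (fun T j =>
              if x = ts.getD j 0 then T.set k (T.getD k 0 + 1) else T) T) T]
        rw [PySem.List.foldl_congr_mem p _
          (fun T x => T.set k (T.getD k 0 + (ts.count x : Int))) T
          (fun T' x _ => by
            rw [pv_range_fold ts (0:Int)
              (fun T y => if x = y then T.set k (T.getD k 0 + 1) else T) T']
            exact pv_count_fold ts x T' k)]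
        exact pv_bump_fold ts p T k
      have hnew : (L ++ [(0:Int)]).set L.length ((L ++ [(0:Int)]).getD L.length 0 + pvCost ts p)
          = L ++ [pvCost ts p] := by
        have hg : (L ++ [(0:Int)]).getD L.length 0 = 0 := by
          simp [List.getD]
        rw [hg, zero_add]
        apply List.ext_getElem
        · simp
        · intro i h1 h2
          simp only [List.getElem_set]
          by_cases hik : L.length = i
          · subst hik
            simp [List.getElem_append_right (Nat.le_refl _)]
          · have hi : i < L.length := by simp at h2; omega
            simp [hik, List.getElem_append_left hi]
      have hthis := ih (L ++ [pvCost ts p])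
      have hlen : ((L ++ [pvCost ts p]).length : Int) - 1 = (L.length : Int) - 1 + 1 := by
        simp
      simp only [hk, hinner, hnew]
      rw [← hlen, hthis]
      simp

-- running minimum basics, via PySem.List.min?
theorem pv_minv_mem (c : Int) (cs : List Int) : cs.foldl min c ∈ c :: cs :=
  PySem.List.min?_mem (PySem.List.min?_id_cons c cs)

theorem pv_minv_isMin (c : Int) (cs : List Int) : ∀ y ∈ c :: cs, cs.foldl min c ≤ y := by
  have := PySem.List.min?_isMin (PySem.List.min?_id_cons c cs)
  simpa using this

-- head of the sorted copy is the running minimum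
theorem pv_sorted_head (c : Int) (cs : List Int) :
    (PySem.List.sorted (c :: cs) (fun x => x) false).getD 0 0 = cs.foldl min c := by
  cases hs : PySem.List.sorted (c :: cs) (fun x => x) false with
  | nil => exact absurd ((PySem.List.sorted_eq_nil_iff _ _ _).mp hs) (by simp)
  | cons m t =>
      have hle : ∀ y ∈ c :: cs, m ≤ y := by
        have := PySem.List.key_head_sorted_le (c :: cs) (fun x => x) hs
        simpa using this
      have hmem : m ∈ c :: cs := by
        have hm : m ∈ PySem.List.sorted (c :: cs) (fun x => x) false := by simp [hs]
        exact (PySem.List.mem_sorted _ _ _ _).mp hm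
      have h1 : m ≤ cs.foldl min c := hle _ (pv_minv_mem c cs)
      have h2 : cs.foldl min c ≤ m := pv_minv_isMin c cs m hmem
      simp [le_antisymm h1 h2]

-- main argmin lemma: first index of the minimum in the cost table picks the same path
-- as B's strict-< best-so-far pass
theorem pv_argmin (ts : List Int) :
    ∀ (ps : List (List Int)) (b : List Int),
      (b :: ps).getD ((PySem.List.index? (pvCost ts b :: ps.map (pvCost ts))
          ((ps.map (pvCost ts)).foldl min (pvCost ts b))).getD 0) []
      = (ps.foldl (fun (st : Option (List Int) × Option Int) pth =>
          let c : Int := pth.foldl (fun s x => s + (PySem.List.count ts x : Int)) 0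
          match st.2 with
          | none => (some pth, some c)
          | some bc => if c < bc then (some pth, some c) else st)
          (some b, some (pvCost ts b))).1.getD [] := by
  intro ps
  induction ps with
  | nil =>
      intro b
      simp
  | cons p rest ih =>
      intro b
      simp only [List.map_cons, List.foldl_cons]
      simp only [show ∀ q : List Int,
        List.foldl (fun s x => s + (PySem.List.count ts x : Int)) 0 q = pvCost ts q
        from fun _ => rfl]
      by_cases h : pvCost ts p < pvCost ts b
      · -- new best: the old head is not the minimum, index skips it
        rw [if_pos h, min_eq_right (le_of_lt h)]
        have hmle : (rest.map (pvCost ts)).foldl min (pvCost ts p) ≤ pvCost ts p :=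
          pv_minv_isMin (pvCost ts p) (rest.map (pvCost ts)) _ (by simp)
        have hne : pvCost ts b ≠ (rest.map (pvCost ts)).foldl min (pvCost ts p) := by
          intro he; rw [he] at h; exact absurd (lt_of_le_of_lt hmle h) (lt_irrefl _)
        have hmem : (rest.map (pvCost ts)).foldl min (pvCost ts p)
            ∈ pvCost ts p :: rest.map (pvCost ts) := pv_minv_mem _ _
        rw [PySem.List.index?_cons_of_ne _ hne]
        cases hidx : PySem.List.index? (pvCost ts p :: rest.map (pvCost ts))
            ((rest.map (pvCost ts)).foldl min (pvCost ts p)) with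
        | none =>
            have hs := (PySem.List.index?_isSome_iff _ _).mpr hmem
            rw [hidx] at hs
            simp at hs
        | some k =>
            simp only [Option.map_some, Option.getD_some]
            have hih := ih p
            rw [hidx] at hih
            simp only [Option.getD_some] at hih
            simpa using hih
      · -- keep old best
        have hle : pvCost ts b ≤ pvCost ts p := le_of_not_gt h
        rw [if_neg h, min_eq_left hle]
        have hih := ih b
        by_cases hcbm : pvCost ts b = (rest.map (pvCost ts)).foldl min (pvCost ts b)
        · rw [← hcbm] at hih ⊢
          rw [PySem.List.index?_cons_self] at hih ⊢
          simpa using hih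
        · have hmle : (rest.map (pvCost ts)).foldl min (pvCost ts b) ≤ pvCost ts b :=
            pv_minv_isMin (pvCost ts b) (rest.map (pvCost ts)) _ (by simp)
          have hlt : (rest.map (pvCost ts)).foldl min (pvCost ts b) < pvCost ts b :=
            lt_of_le_of_ne hmle (fun he => hcbm he.symm)
          have hcpne : pvCost ts p ≠ (rest.map (pvCost ts)).foldl min (pvCost ts b) := by
            intro he; rw [← he] at hlt; exact absurd (lt_of_le_of_lt hle hlt) (lt_irrefl _)
          have hmem' : (rest.map (pvCost ts)).foldl min (pvCost ts b) ∈ rest.map (pvCost ts) := by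
            rcases List.mem_cons.mp (pv_minv_mem (pvCost ts b) (rest.map (pvCost ts))) with he | hm
            · exact absurd he.symm hcbm
            · exact hm
          rw [PySem.List.index?_cons_of_ne _ hcbm, PySem.List.index?_cons_of_ne _ hcpne]
          rw [PySem.List.index?_cons_of_ne _ hcbm] at hih
          cases hidx : PySem.List.index? (rest.map (pvCost ts))
              ((rest.map (pvCost ts)).foldl min (pvCost ts b)) with
          | none =>
              have hs := (PySem.List.index?_isSome_iff _ _).mpr hmem'
              rw [hidx] at hs
              simp at hs
          | some k =>
              rw [hidx] at hih
              simp only [Option.map_some, Option.getD_some] at hih ⊢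
              simpa using hih

-- ===== VERDICT (by name: the statement is the Claim_ definition above) =====
theorem dest_path_spec : Claim_equal_dest_path := by
  intro paths ts _ hpre
  unfold Spec_dest_path dest_path dest_path_alt
  by_cases hlen : paths.length > 1
  · simp only [hlen, if_pos]
    cases paths with
    | nil => simp at hlen
    | cons b ps =>
        have htab := pv_table_fold ts (b :: ps) []
        simp only [List.length_nil, Nat.cast_zero, zero_sub, List.nil_append] at htab
        rw [htab]
        simp only [List.map_cons]
        rw [pv_sorted_head]
        have harg := pv_argmin ts ps b
        rw [harg]
        simp only [List.foldl_cons]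
        rfl
  · have h1 : paths.length = 1 := by
      cases paths with
      | nil => exact absurd rfl hpre
      | cons a t => cases t with
          | nil => rfl
          | cons _ _ => simp at hlen
    simp [h1]
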